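-- pv_equiv track=rewrite | github.com/shong91/python_study | 2022-algorithm/programmers/kakao/순위검색.py | solution
-- ===== SOURCE A (Python) =====
-- def solution(info, query):
--     answer = []
--
--     for q in query:
--         new_query = q.replace(' and', '').split()
--         answer_cnt = 0
--         for i in info:
--             cnt = 0
--             new_info = i.split()
--             for index, value in enumerate(new_info):
--                 if index == 4 and int(new_query[index]) <= int(value):
--                     if cnt == 4:
--                         answer_cnt += 1
--                         break
--                 if new_query[index] != '-' and new_query[index] != value:
--                     break
--                 if new_query[index] == '-' or new_query[index] == value:
--                     cnt += 1
--
--         answer.append(answer_cnt)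
--     return answer
-- ===== SOURCE B (Python) =====
-- from bisect import bisect_left
--
--
-- def _masked(attrs):
--     # all 2^len(attrs) variants of attrs with any subset of positions wildcarded
--     if not attrs:
--         return [()]
--     rest = _masked(attrs[1:])
--     return [(attrs[0],) + r for r in rest] + [('-',) + r for r in rest]
--
--
-- def _count(buckets, q):
--     nq = q.replace(' and', '').split()
--     if len(nq) < 5:
--         return 0
--     try:
--         qs = int(nq[4])
--     except ValueError:
--         return 0
--     scores = buckets.get(tuple(nq[:4]), [])
--     return len(scores) - bisect_left(scores, qs)
--
--
-- def solution(info, query):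
--     buckets = {}
--     for i in info:
--         t = i.split()
--         if len(t) < 5:
--             continue
--         try:
--             score = int(t[4])
--         except ValueError:
--             continue
--         for key in set(_masked(tuple(t[:4]))):
--             buckets.setdefault(key, []).append(score)
--     for key in buckets:
--         buckets[key].sort()
--     return [_count(buckets, q) for q in query]
-- ===== Notes on version B (the rewrite author's own statement) =====
-- stated objective: faster
-- what changed: Instead of re-scanning and re-parsing every info row for every query, B builds once a dictionary from each of the 16 wildcard-masked attribute tuples of every well-formed info row to its scores, sorts each bucket, and answers each query with one dict lookup plus a bisect_left binary search.
import Mathlib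
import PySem

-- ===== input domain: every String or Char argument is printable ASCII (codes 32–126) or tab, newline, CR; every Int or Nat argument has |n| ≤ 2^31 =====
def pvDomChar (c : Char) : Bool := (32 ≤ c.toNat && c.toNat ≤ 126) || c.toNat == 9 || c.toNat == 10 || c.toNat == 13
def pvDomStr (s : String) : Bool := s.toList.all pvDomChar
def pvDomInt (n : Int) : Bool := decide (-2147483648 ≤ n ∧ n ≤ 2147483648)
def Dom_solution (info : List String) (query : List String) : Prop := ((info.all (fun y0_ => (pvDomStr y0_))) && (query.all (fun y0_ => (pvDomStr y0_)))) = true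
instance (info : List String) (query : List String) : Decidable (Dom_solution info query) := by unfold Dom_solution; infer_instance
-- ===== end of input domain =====

-- B replaces A's per-query linear scan of info by a precomputed dict of wildcard-masked
-- attribute buckets of sorted scores, answered by one lookup + binary search per query.

-- ===== PORT A =====
-- inner 'for index, value in enumerate(new_info)' loop with its breaks; returns the 0/1
-- contribution to answer_cnt.  new_query[index] is ported with pyGetD "" and int() with
-- (ofStr? _).getD 0 — Pre_solution excludes exactly the inputs where Python raises there.
def aInner (nq : List String) : List String → Nat → Int → Int
  | [], _, _ => 0
  | v :: rest, idx, cnt =>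
    let qi := PySem.List.pyGetD nq (idx : Int) ""
    if idx = 4 ∧ (PySem.Int.ofStr? qi).getD 0 ≤ (PySem.Int.ofStr? v).getD 0 ∧ cnt = 4 then 1
    else if qi ≠ "-" ∧ qi ≠ v then 0
    else aInner nq rest (idx + 1) (if qi = "-" ∨ qi = v then cnt + 1 else cnt)

def solution (info : List String) (query : List String) : List Int :=
  query.foldl (fun answer q =>
    let new_query := PySem.Str.split₀ (PySem.Str.replace q " and" "")
    let answer_cnt := info.foldl (fun acc i => acc + aInner new_query (PySem.Str.split₀ i) 0 0) 0
    answer ++ [answer_cnt]) []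

-- ===== PORT B =====
-- Source B's _masked: all 2^len(attrs) wildcard variants (tuples ported as List String)
def bMasked : List String → List (List String)
  | [] => [[]]
  | a :: rest => (bMasked rest).map (fun r => a :: r) ++ (bMasked rest).map (fun r => "-" :: r)

-- one iteration of Source B's bucket-building loop: skip rows without a 5th int field,
-- else buckets.setdefault(key, []).append(score) for every masked key
def bStep (d : PySem.Dict (List String) (List Int)) (i : String) : PySem.Dict (List String) (List Int) :=
  let t := PySem.Str.split₀ i
  if t.length < 5 then d
  else
    match PySem.Int.ofStr? (PySem.List.pyGetD t 4 "") with
    | none => d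
    | some score =>
      (PySem.Set.ofList (bMasked (PySem.List.slice t none (some 4)))).foldl
        (fun d k => d.modify k [] (fun v => v ++ [score])) d

-- Source B's _count: answer for one query against the sorted buckets
def bCount (buckets : PySem.Dict (List String) (List Int)) (q : String) : Int :=
  let nq := PySem.Str.split₀ (PySem.Str.replace q " and" "")
  if nq.length < 5 then 0
  else
    match PySem.Int.ofStr? (PySem.List.pyGetD nq 4 "") with
    | none => 0
    | some qs =>
      let scores := buckets.getD (PySem.List.slice nq none (some 4)) []
      (scores.length : Int) - (PySem.List.bisectLeft scores qs : Int)

def solution_alt (info : List String) (query : List String) : List Int :=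
  let buckets := info.foldl bStep PySem.Dict.empty
  let buckets := buckets.keys.foldl
    (fun d k => d.insert k (PySem.List.sorted (d.getD k []) (fun x => x) false)) buckets
  query.map (fun q => bCount buckets q)

-- ===== PRECONDITION & SPEC =====
-- tokenisations both programs perform
def itk (i : String) : List String := PySem.Str.split₀ i
def qtk (q : String) : List String := PySem.Str.split₀ (PySem.Str.replace q " and" "")

-- A's walk over the pair (query tokens nq, row tokens t) raises no exception: whenever the
-- walk reaches index idx (idx below both the row length and 5, all earlier fields matching
-- equal-or-'-'), the query has a token there, and at idx = 4 both 5th tokens parse as ints.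
abbrev NoRaise (nq t : List String) : Prop :=
  ∀ idx : Nat, idx < min t.length 5 →
    (∀ j : Nat, j < idx → (j < nq.length ∧ (nq.getD j "" = "-" ∨ nq.getD j "" = t.getD j ""))) →
    (idx < nq.length ∧ (idx = 4 →
      (PySem.Int.ofStr? (nq.getD 4 "")).isSome = true ∧
      (PySem.Int.ofStr? (t.getD 4 "")).isSome = true))

-- Pre_ excludes EXACTLY the inputs on which the Python A raises (IndexError on a query
-- index past the query's tokens, or ValueError from int() on a non-integer 5th token);
-- A returns normally on every input satisfying Pre_.
def Pre_solution (info : List String) (query : List String) : Prop :=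
  ∀ q ∈ query, ∀ i ∈ info, NoRaise (qtk q) (itk i)
instance (info : List String) (query : List String) : Decidable (Pre_solution info query) := by
  unfold Pre_solution; infer_instance

def pvWitness_solution : List String × List String :=
  (["java backend junior pizza 150", "cpp - senior chicken 50"],
   ["java and backend and junior and pizza 100", "- and - and - and - 30"])

def Spec_solution (info : List String) (query : List String) (out : List Int) : Prop := out = solution_alt info query
instance (info : List String) (query : List String) (out : List Int) : Decidable (Spec_solution info query out) := by unfold Spec_solution; infer_instance

-- ===== CLAIM (what is proved, stated in full; the proofs are below) =====
def Claim_equal_solution : Prop := ∀ (info : List String) (query : List String), Dom_solution info query → Pre_solution info query → Spec_solution info query (solution info query)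

-- ===== LEMMAS AND PROOFS =====

def sc (t : List String) : Int := (PySem.Int.ofStr? (PySem.List.pyGetD t 4 "")).getD 0

-- row is a well-formed 5-field record (as Source B's guards test it)
def eligB (t : List String) : Bool :=
  decide (5 ≤ t.length) && (PySem.Int.ofStr? (PySem.List.pyGetD t 4 "")).isSome

-- query is a well-formed 5-field record
def eligQ (nq : List String) : Bool :=
  decide (5 ≤ nq.length) && (PySem.Int.ofStr? (PySem.List.pyGetD nq 4 "")).isSome

-- the match predicate both programs implement: first four fields equal-or-wildcard, score ≥ query score
def hitB (nq t : List String) : Bool :=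
  ((nq.take 4).zip (t.take 4)).all (fun p => p.1 == p.2 || p.1 == "-") &&
  decide (sc nq ≤ sc t)

lemma len5 {α : Type} {l : List α} (h : 5 ≤ l.length) :
    ∃ a b c d e tail, l = a :: b :: c :: d :: e :: tail := by
  rcases l with _ | ⟨a, _ | ⟨b, _ | ⟨c, _ | ⟨d, _ | ⟨e, tl⟩⟩⟩⟩⟩ <;>
    simp only [List.length_cons, List.length_nil] at h <;>
    first | omega | exact ⟨a, b, c, d, e, tl, rfl⟩

lemma mem_bMasked {k t : List String} (h : k.length = t.length) :
    k ∈ bMasked t ↔ ((k.zip t).all (fun p => p.1 == p.2 || p.1 == "-")) = true := by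
  induction t generalizing k with
  | nil =>
    have : k = [] := List.eq_nil_of_length_eq_zero h
    subst this; simp [bMasked]
  | cons a rest ih =>
    cases k with
    | nil => simp at h
    | cons q k' =>
      simp only [List.length_cons, Nat.add_right_cancel_iff] at h
      simp only [bMasked, List.mem_append, List.mem_map, List.zip_cons_cons, List.all_cons,
        Bool.and_eq_true, Bool.or_eq_true, beq_iff_eq]
      constructor
      · rintro (⟨r, hr, he⟩ | ⟨r, hr, he⟩) <;>
          (cases he; exact ⟨by simp, (ih h).mp hr⟩)
      · rintro ⟨hq, hall⟩
        rcases hq with hq | hq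
        · exact Or.inl ⟨k', (ih h).mpr hall, by rw [hq]⟩
        · exact Or.inr ⟨k', (ih h).mpr hall, by rw [hq]⟩

-- A's inner walk scores 0 when it exhausts a row of at most four tokens
lemma aInner_short (nq : List String) :
    ∀ (ni : List String) (idx : Nat) (cnt : Int), idx + ni.length ≤ 4 →
      aInner nq ni idx cnt = 0 := by
  intro ni
  induction ni with
  | nil => intro idx cnt _; rfl
  | cons v rest ih =>
    intro idx cnt h
    simp only [List.length_cons] at h
    simp only [aInner]
    rw [if_neg (fun hc => absurd hc.1 (by omega))]
    by_cases hm : PySem.List.pyGetD nq (idx : Int) "" ≠ "-" ∧ PySem.List.pyGetD nq (idx : Int) "" ≠ v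
    · rw [if_pos hm]
    · rw [if_neg hm]
      exact ih (idx + 1) _ (by omega)

-- A's inner walk on a pair of well-formed records decides exactly the match predicate
lemma aInner_step (nq : List String) (v : String) (rest : List String) (idx : Nat) (cnt : Int)
    (h : idx ≠ 4) :
    aInner nq (v :: rest) idx cnt =
      if PySem.List.pyGetD nq (idx : Int) "" ≠ "-" ∧ PySem.List.pyGetD nq (idx : Int) "" ≠ v then 0
      else aInner nq rest (idx + 1)
        (if PySem.List.pyGetD nq (idx : Int) "" = "-" ∨ PySem.List.pyGetD nq (idx : Int) "" = v
          then cnt + 1 else cnt) := by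
  simp only [aInner]
  rw [if_neg (fun hc => h hc.1)]

lemma aInner_four (nq : List String) (v : String) (rest : List String) (cnt : Int) :
    aInner nq (v :: rest) 4 cnt =
      if (PySem.Int.ofStr? (PySem.List.pyGetD nq ((4:Nat) : Int) "")).getD 0 ≤ (PySem.Int.ofStr? v).getD 0 ∧ cnt = 4 then 1
      else if PySem.List.pyGetD nq ((4:Nat) : Int) "" ≠ "-" ∧ PySem.List.pyGetD nq ((4:Nat) : Int) "" ≠ v then 0
      else aInner nq rest (4 + 1)
        (if PySem.List.pyGetD nq ((4:Nat) : Int) "" = "-" ∨ PySem.List.pyGetD nq ((4:Nat) : Int) "" = v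
          then cnt + 1 else cnt) := by
  simp only [aInner]
  by_cases h : (PySem.Int.ofStr? (PySem.List.pyGetD nq ((4:Nat) : Int) "")).getD 0 ≤ (PySem.Int.ofStr? v).getD 0 ∧ cnt = 4
  · rw [if_pos (by exact ⟨by trivial, h.1, h.2⟩), if_pos h]
  · rw [if_neg (fun hc => h ⟨hc.2.1, hc.2.2⟩), if_neg h]

lemma aInner_eq (nq t : List String) (hnq : 5 ≤ nq.length) (ht : 5 ≤ t.length)
    (hq : (PySem.Int.ofStr? (PySem.List.pyGetD nq 4 "")).isSome = true)
    (hv : (PySem.Int.ofStr? (PySem.List.pyGetD t 4 "")).isSome = true) :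
    aInner nq t 0 0 = if hitB nq t then 1 else 0 := by
  obtain ⟨q0, q1, q2, q3, q4, qr, rfl⟩ := len5 hnq
  obtain ⟨a, b, c, d, e, tr, rfl⟩ := len5 ht
  have hg : ∀ (k : Nat), PySem.List.pyGetD (q0::q1::q2::q3::q4::qr) ((k:Nat) : Int) ""
      = (q0::q1::q2::q3::q4::qr).getD k "" := by
    intro k; exact PySem.List.pyGetD_natCast _ _ _
  have hg0 : PySem.List.pyGetD (q0::q1::q2::q3::q4::qr) ((0:Nat) : Int) "" = q0 := by rw [hg]; rfl
  have hg1 : PySem.List.pyGetD (q0::q1::q2::q3::q4::qr) ((0+1:Nat) : Int) "" = q1 := by rw [hg]; rfl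
  have hg2 : PySem.List.pyGetD (q0::q1::q2::q3::q4::qr) ((0+1+1:Nat) : Int) "" = q2 := by rw [hg]; rfl
  have hg3 : PySem.List.pyGetD (q0::q1::q2::q3::q4::qr) ((0+1+1+1:Nat) : Int) "" = q3 := by rw [hg]; rfl
  have hg4 : PySem.List.pyGetD (q0::q1::q2::q3::q4::qr) ((4:Nat) : Int) "" = q4 := by rw [hg]; rfl
  have hq4 : PySem.List.pyGetD (q0::q1::q2::q3::q4::qr) (4 : Int) "" = q4 := by
    rw [PySem.List.pyGetD_ofNat' _ 4]; rfl
  have he4 : PySem.List.pyGetD (a::b::c::d::e::tr) (4 : Int) "" = e := by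
    rw [PySem.List.pyGetD_ofNat' _ 4]; rfl
  rw [hq4] at hq
  rw [he4] at hv
  obtain ⟨m, hm⟩ := Option.isSome_iff_exists.mp hq
  obtain ⟨n, hn⟩ := Option.isSome_iff_exists.mp hv
  have hq4d : q4 ≠ "-" := by
    intro hcon; rw [hcon] at hm; simp [show PySem.Int.ofStr? "-" = none from rfl] at hm
  have hhit : (hitB (q0::q1::q2::q3::q4::qr) (a::b::c::d::e::tr) = true)
      ↔ (((q0 = a ∨ q0 = "-") ∧ (q1 = b ∨ q1 = "-") ∧ (q2 = c ∨ q2 = "-") ∧ (q3 = d ∨ q3 = "-"))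
          ∧ (m : Int) ≤ n) := by
    simp [hitB, sc, hq4, he4, hm, hn]
  -- walk the first four indices
  rw [aInner_step _ _ _ 0 _ (by omega), hg0]
  by_cases h0 : q0 = "-" ∨ q0 = a
  case neg =>
    rw [if_pos ⟨fun h => h0 (Or.inl h), fun h => h0 (Or.inr h)⟩,
      if_neg (by rw [hhit]; exact fun hc => h0 hc.1.1.symm)]
  case pos =>
  rw [if_neg (fun hc => h0.elim (fun h => hc.1 h) (fun h => hc.2 h)), if_pos h0]
  rw [aInner_step _ _ _ (0+1) _ (by omega), hg1]
  by_cases h1 : q1 = "-" ∨ q1 = b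
  case neg =>
    rw [if_pos ⟨fun h => h1 (Or.inl h), fun h => h1 (Or.inr h)⟩,
      if_neg (by rw [hhit]; exact fun hc => h1 hc.1.2.1.symm)]
  case pos =>
  rw [if_neg (fun hc => h1.elim (fun h => hc.1 h) (fun h => hc.2 h)), if_pos h1]
  rw [aInner_step _ _ _ (0+1+1) _ (by omega), hg2]
  by_cases h2 : q2 = "-" ∨ q2 = c
  case neg =>
    rw [if_pos ⟨fun h => h2 (Or.inl h), fun h => h2 (Or.inr h)⟩,
      if_neg (by rw [hhit]; exact fun hc => h2 hc.1.2.2.1.symm)]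
  case pos =>
  rw [if_neg (fun hc => h2.elim (fun h => hc.1 h) (fun h => hc.2 h)), if_pos h2]
  rw [aInner_step _ _ _ (0+1+1+1) _ (by omega), hg3]
  by_cases h3 : q3 = "-" ∨ q3 = d
  case neg =>
    rw [if_pos ⟨fun h => h3 (Or.inl h), fun h => h3 (Or.inr h)⟩,
      if_neg (by rw [hhit]; exact fun hc => h3 hc.1.2.2.2.symm)]
  case pos =>
  rw [if_neg (fun hc => h3.elim (fun h => hc.1 h) (fun h => hc.2 h)), if_pos h3]
  have h04 : (0+1+1+1+1 : Nat) = 4 := by omega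
  rw [h04]
  rw [aInner_four, hg4, hm, hn]
  by_cases h4 : (m : Int) ≤ n
  case pos =>
    rw [if_pos ⟨h4, by norm_num⟩,
      if_pos (by rw [hhit]; exact ⟨⟨h0.symm, h1.symm, h2.symm, h3.symm⟩, h4⟩)]
  case neg =>
    have hq4e : q4 ≠ e := by
      intro hcon; rw [hcon, hn] at hm
      injection hm with hmn
      omega
    rw [if_neg (fun hc => h4 hc.1), if_pos ⟨hq4d, hq4e⟩,
      if_neg (by rw [hhit]; exact fun hc => h4 hc.2)]

-- A's inner walk breaks with 0 at the first mismatched index j < 4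
lemma aInner_break (nq : List String) (a b c d e : String) (tr : List String) (j : Nat)
    (hj : j < 4)
    (hpre : ∀ k : Nat, k < j → (nq.getD k "" = "-" ∨ nq.getD k "" = (a::b::c::d::e::tr).getD k ""))
    (hmis : nq.getD j "" ≠ "-" ∧ nq.getD j "" ≠ (a::b::c::d::e::tr).getD j "") :
    aInner nq (a::b::c::d::e::tr) 0 0 = 0 := by
  have hg : ∀ (k : Nat), PySem.List.pyGetD nq ((k:Nat) : Int) "" = nq.getD k "" := by
    intro k; exact PySem.List.pyGetD_natCast _ _ _
  have e0 : (a::b::c::d::e::tr).getD 0 "" = a := rfl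
  have e1 : (a::b::c::d::e::tr).getD 1 "" = b := rfl
  have e2 : (a::b::c::d::e::tr).getD 2 "" = c := rfl
  have e3 : (a::b::c::d::e::tr).getD 3 "" = d := rfl
  interval_cases j
  · rw [e0] at hmis
    rw [aInner_step _ _ _ 0 _ (by omega), hg, if_pos hmis]
  · have h0 := hpre 0 (by omega); rw [e0] at h0; rw [e1] at hmis
    rw [aInner_step _ _ _ 0 _ (by omega), hg,
      if_neg (fun hc => h0.elim (fun h => hc.1 h) (fun h => hc.2 h)), if_pos h0,
      aInner_step _ _ _ (0+1) _ (by omega), hg, if_pos hmis]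
  · have h0 := hpre 0 (by omega); rw [e0] at h0
    have h1 := hpre 1 (by omega); rw [e1] at h1; rw [e2] at hmis
    rw [aInner_step _ _ _ 0 _ (by omega), hg,
      if_neg (fun hc => h0.elim (fun h => hc.1 h) (fun h => hc.2 h)), if_pos h0,
      aInner_step _ _ _ (0+1) _ (by omega), hg,
      if_neg (fun hc => h1.elim (fun h => hc.1 h) (fun h => hc.2 h)), if_pos h1,
      aInner_step _ _ _ (0+1+1) _ (by omega), hg, if_pos hmis]
  · have h0 := hpre 0 (by omega); rw [e0] at h0
    have h1 := hpre 1 (by omega); rw [e1] at h1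
    have h2 := hpre 2 (by omega); rw [e2] at h2; rw [e3] at hmis
    rw [aInner_step _ _ _ 0 _ (by omega), hg,
      if_neg (fun hc => h0.elim (fun h => hc.1 h) (fun h => hc.2 h)), if_pos h0,
      aInner_step _ _ _ (0+1) _ (by omega), hg,
      if_neg (fun hc => h1.elim (fun h => hc.1 h) (fun h => hc.2 h)), if_pos h1,
      aInner_step _ _ _ (0+1+1) _ (by omega), hg,
      if_neg (fun hc => h2.elim (fun h => hc.1 h) (fun h => hc.2 h)), if_pos h2,
      aInner_step _ _ _ (0+1+1+1) _ (by omega), hg, if_pos hmis]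

-- a mismatch at an in-bounds index j < 4 falsifies the match predicate
lemma hitB_false (nq t : List String) (j : Nat) (hj : j < 4) (hjn : j < nq.length)
    (hjt : j < t.length)
    (hmis : nq.getD j "" ≠ "-" ∧ nq.getD j "" ≠ t.getD j "") : hitB nq t = false := by
  have hmem : (nq.getD j "", t.getD j "") ∈ (nq.take 4).zip (t.take 4) := by
    apply List.mem_iff_getElem.mpr
    refine ⟨j, by simp [List.length_zip, List.length_take]; omega, ?_⟩
    rw [List.getElem_zip]
    simp [List.getElem_take, List.getD_eq_getElem?_getD, List.getElem?_eq_getElem hjn,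
      List.getElem?_eq_getElem hjt]
  have hall : (((nq.take 4).zip (t.take 4)).all (fun p => p.1 == p.2 || p.1 == "-")) = false := by
    rw [List.all_eq_false]
    refine ⟨_, hmem, ?_⟩
    simp only [List.getD_eq_getElem?_getD] at hmis
    simp [hmis.1, hmis.2]
  simp [hitB, hall]

-- under NoRaise the walk's query accesses stay in bounds up to the first mismatch
lemma walk_bounds (nq t : List String) (h : NoRaise nq t) (ht5 : 5 ≤ t.length) :
    ∀ m : Nat, m ≤ 4 →
      (∀ k : Nat, k < m → (nq.getD k "" = "-" ∨ nq.getD k "" = t.getD k "")) →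
      (∀ j : Nat, j < m → j < nq.length) ∧ m < nq.length := by
  intro m
  induction m with
  | zero =>
    intro _ _
    exact ⟨fun j hj => absurd hj (by omega), (h 0 (by omega) (fun j hj => absurd hj (by omega))).1⟩
  | succ k ih =>
    intro hk hmatch
    obtain ⟨hb, hlk⟩ := ih (by omega) (fun l hl => hmatch l (by omega))
    have hpre : ∀ j : Nat, j < k + 1 → (j < nq.length ∧ (nq.getD j "" = "-" ∨ nq.getD j "" = t.getD j "")) := by
      intro j hj
      rcases Nat.lt_succ_iff_lt_or_eq.mp hj with hj' | rfl
      · exact ⟨hb j hj', hmatch j (by omega)⟩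
      · exact ⟨hlk, hmatch j (by omega)⟩
    have := h (k + 1) (by omega) hpre
    refine ⟨fun j hj => ?_, this.1⟩
    rcases Nat.lt_succ_iff_lt_or_eq.mp hj with hj' | rfl
    · exact hb j hj'
    · exact hlk

-- under NoRaise, A's inner walk computes the 0/1 match bit of the pair
lemma aInner_main (nq t : List String) (h : NoRaise nq t) :
    aInner nq t 0 0 = if eligB t && eligQ nq && hitB nq t then 1 else 0 := by
  by_cases ht5 : 5 ≤ t.length
  case neg =>
    rw [aInner_short nq t 0 0 (by omega)]
    have : eligB t = false := by unfold eligB; simp; intro hc; omega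
    simp [this]
  case pos =>
  obtain ⟨a, b, c, d, e, tr, rfl⟩ := len5 ht5
  set t := a::b::c::d::e::tr with htdef
  by_cases hfull : ∀ j : Nat, j < 4 → (nq.getD j "" = "-" ∨ nq.getD j "" = t.getD j "")
  case pos =>
    -- the walk reaches index 4: NoRaise supplies the shape facts and aInner_eq finishes
    obtain ⟨hb, h4n⟩ := walk_bounds nq t h ht5 4 (by omega) hfull
    have h4 := h 4 (by simp [htdef]) (fun j hj => ⟨hb j hj, hfull j hj⟩)
    obtain ⟨hqp, htp⟩ := h4.2 rfl
    have hnq5 : 5 ≤ nq.length := by omega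
    have hgq : PySem.List.pyGetD nq 4 "" = nq.getD 4 "" := by
      rw [PySem.List.pyGetD_ofNat' _ 4]
    have hgt : PySem.List.pyGetD t 4 "" = t.getD 4 "" := by
      rw [PySem.List.pyGetD_ofNat' _ 4]
    rw [aInner_eq nq t hnq5 ht5 (by rw [hgq]; exact hqp) (by rw [hgt]; exact htp)]
    have he1 : eligB t = true := by unfold eligB; simp [ht5]; rw [hgt]; exact htp
    have he2 : eligQ nq = true := by unfold eligQ; simp [hnq5]; rw [hgq]; exact hqp
    rw [he1, he2]
    simp
  case neg =>
    -- first mismatched index j: the walk breaks with 0 and the match predicate is false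
    push_neg at hfull
    have hex : ∃ j : Nat, j < 4 ∧ ¬(nq.getD j "" = "-" ∨ nq.getD j "" = t.getD j "") := by
      obtain ⟨j, hj, hm1, hm2⟩ := hfull
      exact ⟨j, hj, fun hc => hc.elim hm1 hm2⟩
    have hwf : ∃ j : Nat, j < 4 ∧ ¬(nq.getD j "" = "-" ∨ nq.getD j "" = t.getD j "") := hex
    obtain ⟨hj4, hjm⟩ := Nat.find_spec hwf
    set j := Nat.find hwf with hjdef
    have hjmin : ∀ k : Nat, k < j → (nq.getD k "" = "-" ∨ nq.getD k "" = t.getD k "") := by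
      intro k hk
      by_contra hc
      exact absurd (Nat.find_min hwf hk) (by simp only [not_not]; exact ⟨by omega, hc⟩)
    have hjn : j < nq.length := (walk_bounds nq t h ht5 j (by omega) hjmin).2
    have hmis : nq.getD j "" ≠ "-" ∧ nq.getD j "" ≠ t.getD j "" :=
      ⟨fun hc => hjm (Or.inl hc), fun hc => hjm (Or.inr hc)⟩
    rw [aInner_break nq a b c d e tr j hj4 hjmin hmis]
    rw [hitB_false nq t j hj4 hjn (by simp [htdef]; omega) hmis]
    simp

lemma modify_fold_getD (ks : List (List String)) (hks : ks.Nodup)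
    (d : PySem.Dict (List String) (List Int)) (K : List String) (s : Int) :
    (ks.foldl (fun d k => d.modify k [] (fun v => v ++ [s])) d).getD K []
      = d.getD K [] ++ (if K ∈ ks then [s] else []) := by
  induction ks generalizing d with
  | nil => simp
  | cons k ks ih =>
    simp only [List.nodup_cons] at hks
    simp only [List.foldl_cons]
    rw [ih hks.2]
    by_cases hK : K = k
    · subst hK
      rw [PySem.Dict.getD_modify]
      simp [hks.1]
    · rw [PySem.Dict.getD_modify]
      simp [hK, List.mem_cons]

lemma slice4 (t : List String) : PySem.List.slice t none (some 4) = t.take 4 := by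
  simpa using PySem.List.slice_to t (b := 4) (by omega)

lemma build_getD (info : List String) (d : PySem.Dict (List String) (List Int)) (K : List String) :
    (info.foldl bStep d).getD K []
      = d.getD K [] ++ ((info.filter (fun i => eligB (itk i) &&
          decide (K ∈ bMasked ((itk i).take 4)))).map (fun i => sc (itk i))) := by
  induction info generalizing d with
  | nil => simp
  | cons i info ih =>
    simp only [List.foldl_cons]
    rw [ih]
    have hstep : (bStep d i).getD K []
        = d.getD K [] ++ (if eligB (itk i) &&
            decide (K ∈ bMasked ((itk i).take 4)) then [sc (itk i)] else []) := by
      unfold bStep eligB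
      by_cases hlen : (PySem.Str.split₀ i).length < 5
      · simp [hlen, itk, show ¬ (5 ≤ (PySem.Str.split₀ i).length) by omega]
      · simp only [if_neg hlen]
        rcases hp : PySem.Int.ofStr? (PySem.List.pyGetD (PySem.Str.split₀ i) 4 "") with _ | s
        · simp [hp, itk]
        ·
          rw [modify_fold_getD _ (PySem.Set.nodup_ofList _) d K _]
          rw [slice4]
          simp [PySem.Set.mem_ofList, itk, sc, hp, show 5 ≤ (PySem.Str.split₀ i).length by omega]
    rw [hstep]
    by_cases hm : (eligB (itk i) && decide (K ∈ bMasked ((itk i).take 4))) = true <;>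
      simp [hm, List.append_assoc]

lemma build_nodup_keys (info : List String) (d : PySem.Dict (List String) (List Int))
    (h : d.keys.Nodup) : (info.foldl bStep d).keys.Nodup := by
  induction info generalizing d with
  | nil => exact h
  | cons i info ih =>
    simp only [List.foldl_cons]
    apply ih
    unfold bStep
    by_cases hlen : (PySem.Str.split₀ i).length < 5
    · simpa [hlen] using h
    · simp only [if_neg hlen]
      rcases hp : PySem.Int.ofStr? (PySem.List.pyGetD (PySem.Str.split₀ i) 4 "") with _ | s
      · exact h
      · exact PySem.Dict.nodup_keys_foldl_modify_key _ (fun k => k) []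
          (fun _ _ => (fun v => v ++ [s])) d h

lemma sort_fold_getD (ks : List (List String)) (hks : ks.Nodup)
    (d : PySem.Dict (List String) (List Int)) (K : List String) :
    (ks.foldl (fun d k => d.insert k (PySem.List.sorted (d.getD k []) (fun x => x) false)) d).getD K []
      = if K ∈ ks then PySem.List.sorted (d.getD K []) (fun x => x) false else d.getD K [] := by
  induction ks generalizing d with
  | nil => simp
  | cons k ks ih =>
    simp only [List.nodup_cons] at hks
    simp only [List.foldl_cons]
    rw [ih hks.2]
    by_cases hK : K = k
    · subst hK
      simp [hks.1]
    · by_cases hm : K ∈ ks <;>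
        simp [hK, hm, PySem.Dict.getD_insert, List.mem_cons]

lemma countP_lt_of_cut (s : List Int) (x : Int) (b : Nat) (hb : b ≤ s.length)
    (h1 : ∀ (j : Nat) (hj : j < s.length), j < b → s[j] < x)
    (h2 : ∀ (j : Nat) (hj : j < s.length), b ≤ j → x ≤ s[j]) :
    s.countP (fun v => decide (v < x)) = b := by
  have hsplit : s = s.take b ++ s.drop b := (List.take_append_drop b s).symm
  rw [hsplit, List.countP_append]
  have htake : (s.take b).countP (fun v => decide (v < x)) = (s.take b).length := by
    apply List.countP_eq_length.mpr
    intro a ha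
    obtain ⟨j, hj, rfl⟩ := List.mem_iff_getElem.mp ha
    have hjb : j < b := by
      have := hj; simp [List.length_take] at this; omega
    have hjs : j < s.length := by omega
    simpa [List.getElem_take] using h1 j hjs hjb
  have hdrop : (s.drop b).countP (fun v => decide (v < x)) = 0 := by
    apply List.countP_eq_zero.mpr
    intro a ha
    obtain ⟨j, hj, rfl⟩ := List.mem_iff_getElem.mp ha
    have hjs : b + j < s.length := by
      have := hj; simp [List.length_drop] at this; omega
    simp only [List.getElem_drop]
    have := h2 (b + j) hjs (by omega)
    simp; omega
  rw [htake, hdrop, List.length_take]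
  omega

lemma bisect_count (l : List Int) (x : Int) :
    ((PySem.List.sorted l (fun v => v) false).length : Int)
      - (PySem.List.bisectLeft (PySem.List.sorted l (fun v => v) false) x : Int)
      = (l.countP (fun v => decide (x ≤ v)) : Int) := by
  set s := PySem.List.sorted l (fun v => v) false with hs
  have hpw : s.Pairwise (fun a b => a ≤ b) := by
    simpa using PySem.List.sorted_pairwise l (fun v => v)
  obtain ⟨hle, hlt, hge⟩ := PySem.List.bisectLeft_spec s x hpw
  have hcnt : s.countP (fun v => decide (v < x)) = PySem.List.bisectLeft s x :=
    countP_lt_of_cut s x _ hle hlt hge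
  have hperm : s.Perm l := PySem.List.sorted_perm l (fun v => v) false
  have hlen : s.length = l.length := hperm.length_eq
  have hsum : l.countP (fun v => decide (x ≤ v)) + l.countP (fun v => decide (v < x)) = l.length := by
    have hlf := List.length_eq_length_filter_add (l := l) (f := fun v => decide (x ≤ v))
    rw [List.countP_eq_length_filter, List.countP_eq_length_filter]
    have he : (fun v : Int => decide (v < x)) = (fun v => !(decide (x ≤ v))) := by
      funext v; by_cases h : x ≤ v <;> simp [h] <;> omega
    rw [he, hlf]
  have hcl : s.countP (fun v => decide (v < x)) = l.countP (fun v => decide (v < x)) :=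
    hperm.countP_eq _
  omega

set_option maxHeartbeats 1600000 in
-- per-query equality of the two programs' counts
lemma perQuery (info : List String) (q : String)
    (hpair : ∀ i ∈ info, NoRaise (qtk q) (itk i)) :
    (info.foldl (fun acc i => acc + aInner (qtk q) (PySem.Str.split₀ i) 0 0) 0 : Int)
      = bCount ((info.foldl bStep PySem.Dict.empty).keys.foldl
          (fun d k => d.insert k (PySem.List.sorted (d.getD k []) (fun x => x) false))
          (info.foldl bStep PySem.Dict.empty)) q := by
  set nq := qtk q with hnqdef
  set buckets := info.foldl bStep PySem.Dict.empty with hbk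
  -- A's loop is a sum of per-pair match bits
  have hpt : ∀ (acc : Int), ∀ i ∈ info,
      acc + aInner nq (PySem.Str.split₀ i) 0 0
        = acc + (if eligB (itk i) && eligQ nq && hitB nq (itk i) then 1 else 0) := by
    intro acc i hi
    rw [show PySem.Str.split₀ i = itk i from rfl, aInner_main nq (itk i) (hpair i hi)]
  rw [PySem.List.foldl_congr_mem info _ _ 0 hpt]
  by_cases heq : eligQ nq = true
  case neg =>
    -- malformed query: every row contributes 0 in A, and bCount returns 0
    have hz : ∀ (acc : Int), ∀ i ∈ info,
        acc + (if eligB (itk i) && eligQ nq && hitB nq (itk i) then 1 else 0) = acc := by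
      intro acc i hi
      rw [Bool.eq_false_iff.mpr heq]
      simp
    rw [PySem.List.foldl_congr_mem info _ _ 0 hz, PySem.List.foldl_ignore]
    unfold bCount
    rw [show PySem.Str.split₀ (PySem.Str.replace q " and" "") = nq from rfl]
    unfold eligQ at heq
    by_cases h5 : nq.length < 5
    · simp [h5]
    · rcases hp : PySem.Int.ofStr? (PySem.List.pyGetD nq 4 "") with _ | qs
      · simp [h5, hp]
      · exact absurd (by simp [hp]; omega) heq
  case pos =>
  have hq5 : 5 ≤ nq.length := by
    have := heq; unfold eligQ at this; simp at this; exact_mod_cast this.1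
  have hqp : (PySem.Int.ofStr? (PySem.List.pyGetD nq 4 "")).isSome = true := by
    have := heq; unfold eligQ at this; simp at this; exact this.2
  obtain ⟨qs, hqs⟩ := Option.isSome_iff_exists.mp hqp
  -- B takes its main branch
  have hB : bCount (buckets.keys.foldl
      (fun d k => d.insert k (PySem.List.sorted (d.getD k []) (fun x => x) false)) buckets) q
      = ((buckets.keys.foldl
          (fun d k => d.insert k (PySem.List.sorted (d.getD k []) (fun x => x) false)) buckets).getD
            (PySem.List.slice nq none (some 4)) []).length
        - (PySem.List.bisectLeft ((buckets.keys.foldl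
          (fun d k => d.insert k (PySem.List.sorted (d.getD k []) (fun x => x) false)) buckets).getD
            (PySem.List.slice nq none (some 4)) []) qs : Int) := by
    unfold bCount
    rw [show PySem.Str.split₀ (PySem.Str.replace q " and" "") = nq from rfl]
    rw [if_neg (by omega), hqs]
  rw [hB]
  set K := PySem.List.slice nq none (some 4) with hK
  have hraw : buckets.getD K []
      = (info.filter (fun i => eligB (itk i) && decide (K ∈ bMasked ((itk i).take 4)))).map
          (fun i => sc (itk i)) := by
    rw [hbk, build_getD]; simp
  have hnd : buckets.keys.Nodup := build_nodup_keys info _ PySem.Dict.nodup_keys_empty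
  have hscores : (buckets.keys.foldl
      (fun d k => d.insert k (PySem.List.sorted (d.getD k []) (fun x => x) false)) buckets).getD K []
      = PySem.List.sorted (buckets.getD K []) (fun x => x) false := by
    rw [sort_fold_getD buckets.keys hnd buckets K]
    by_cases hm : K ∈ buckets.keys
    · simp [hm]
    · have hc : buckets.contains K = false := by
        rw [← Bool.not_eq_true]
        intro hc
        exact hm ((PySem.Dict.contains_iff_mem_keys _ _).mp hc)
      rw [PySem.Dict.getD_of_not_contains buckets ([] : List Int) hc]
      simp [hm]
      rfl
  rw [hscores, hraw]
  have hA : (info.foldl (fun acc i =>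
        acc + (if eligB (itk i) && eligQ nq && hitB nq (itk i) then 1 else 0)) 0 : Int)
      = (info.countP (fun i => eligB (itk i) && hitB nq (itk i)) : Int) := by
    have hsimp : ∀ (acc : Int), ∀ i ∈ info,
        acc + (if eligB (itk i) && eligQ nq && hitB nq (itk i) then 1 else 0)
          = acc + (if eligB (itk i) && hitB nq (itk i) then 1 else 0) := by
      intro acc i hi
      rw [heq]
      simp [Bool.and_comm, Bool.and_assoc]
    rw [PySem.List.foldl_congr_mem info _ _ 0 hsimp]
    rw [PySem.List.foldl_add, PySem.List.sum_map_ite_one_zero]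
    simp
  rw [hA, bisect_count]
  refine congrArg (fun n : Nat => (n : Int)) ?_
  rw [List.countP_map, List.countP_filter]
  apply List.countP_congr
  intro i hi
  by_cases he : eligB (itk i) = true
  · have h5 : 5 ≤ (itk i).length := by
      have := he; unfold eligB at this; simp at this; exact_mod_cast this.1
    have hlen : (nq.take 4).length = ((itk i).take 4).length := by
      simp [List.length_take]; omega
    simp only [hitB, Function.comp, hK, slice4, Bool.and_eq_true, decide_eq_true_eq]
    rw [mem_bMasked hlen]
    have hxs : qs = sc nq := by simp [sc, hqs]
    rw [← hxs]
    exact ⟨fun ⟨a, b, c⟩ => ⟨c, a, b⟩, fun ⟨c, a, b⟩ => ⟨a, b, c⟩⟩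
  · simp [he]

-- ===== VERDICT (by name: the statement is the Claim_ definition above) =====
theorem solution_spec : Claim_equal_solution := by
  intro info query _hdom hpre
  unfold Spec_solution
  show solution info query = solution_alt info query
  simp only [solution, solution_alt]
  rw [PySem.List.foldl_append_singleton_eq_map]
  simp only [List.nil_append]
  apply List.map_congr_left
  intro q hq
  exact perQuery info q (fun i hi => hpre q hq i hi)
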